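-- pv_equiv track=rewrite | github.com/pmsrao/io-telco | scripts/gen_registry_bootstrap.py | infer_key
-- ===== SOURCE A (Python) =====
-- from typing import Dict, List, Any, Optional
--
-- def infer_key(table: str, cols: List[Dict[str, str]]) -> Optional[str]:
--     names = [c["name"] for c in cols]
--     lower = [n.lower() for n in names]
--     # prefer <table>_id
--     t_id = f"{table}_id".lower()
--     if t_id in lower: return names[lower.index(t_id)]
--     # prefer first *_id
--     for n in names:
--         if n.lower().endswith("_id"): return n
--     # fallback "id"
--     if "id" in lower: return names[lower.index("id")]
--     return None
-- ===== SOURCE B (Python) =====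
-- def infer_key(table, cols):
--     # single pass: record the first match of each of the three candidate kinds
--     t_id = f"{table}_id".lower()
--     table_match = suffix_match = id_match = None
--     for c in cols:
--         n = c["name"]
--         low = n.lower()
--         if table_match is None and low == t_id:
--             table_match = n
--         if suffix_match is None and low.endswith("_id"):
--             suffix_match = n
--         if id_match is None and low == "id":
--             id_match = n
--     if table_match is not None:
--         return table_match
--     if suffix_match is not None:
--         return suffix_match
--     return id_match
-- ===== Notes on version B (the rewrite author's own statement) =====
-- stated objective: alternative
-- what changed: A builds names/lowercased lists and makes up to three separate scans (membership test + list.index, a suffix loop, another membership + index); B is one pass over cols that records the first table-id, first *_id and first exact 'id' match and picks among them afterwards.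
import Mathlib
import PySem

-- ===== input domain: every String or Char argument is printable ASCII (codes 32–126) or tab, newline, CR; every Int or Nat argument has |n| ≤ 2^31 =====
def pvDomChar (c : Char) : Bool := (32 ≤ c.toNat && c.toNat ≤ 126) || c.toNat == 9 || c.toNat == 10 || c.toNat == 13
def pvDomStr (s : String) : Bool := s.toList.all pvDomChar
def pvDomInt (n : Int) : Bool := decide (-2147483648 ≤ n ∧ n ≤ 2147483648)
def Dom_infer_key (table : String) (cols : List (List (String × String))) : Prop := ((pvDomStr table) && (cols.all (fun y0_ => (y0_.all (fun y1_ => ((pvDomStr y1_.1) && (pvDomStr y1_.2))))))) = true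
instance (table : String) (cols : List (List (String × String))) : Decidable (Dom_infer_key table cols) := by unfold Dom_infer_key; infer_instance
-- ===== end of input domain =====

-- B replaces A's three separate scans (membership + list.index, the *_id loop, membership + index)
-- by one pass over cols that records the first match of each candidate kind; same cost, different decomposition.

-- shared helper: c["name"] (Pre_ guarantees the key is present, so the getD "" default is never taken)
def pvName (c : List (String × String)) : String :=
  ((PySem.Dict.mk c).get? "name").getD ""

-- ===== PORT A =====
def infer_key (table : String) (cols : List (List (String × String))) : Option String :=
  let names := cols.map pvName
  let lower := names.map PySem.Str.lower
  let t_id := PySem.Str.lower (PySem.Str.join "" [table, "_id"])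
  if lower.contains t_id then
    -- names[lower.index(t_id)]; 'in' was just checked, so index? is some and pyGet? is in range
    match PySem.List.index? lower t_id with
    | some i => PySem.List.pyGet? names (i : Int)
    | none => none
  else
    match names.find? (fun n => PySem.Str.endswith (PySem.Str.lower n) "_id") with
    | some n => some n
    | none =>
      if lower.contains "id" then
        match PySem.List.index? lower "id" with
        | some i => PySem.List.pyGet? names (i : Int)
        | none => none
      else none

-- ===== PORT B =====
-- loop body of B's single pass (state: first table-id match, first *_id match, first exact "id" match)
def pvStep (t_id : String) (s : Option String × Option String × Option String)
    (c : List (String × String)) : Option String × Option String × Option String :=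
  ((if s.1.isNone && (PySem.Str.lower (pvName c) == t_id) then some (pvName c) else s.1),
   (if s.2.1.isNone && PySem.Str.endswith (PySem.Str.lower (pvName c)) "_id" then some (pvName c) else s.2.1),
   (if s.2.2.isNone && (PySem.Str.lower (pvName c) == "id") then some (pvName c) else s.2.2))

def infer_key_alt (table : String) (cols : List (List (String × String))) : Option String :=
  let t_id := PySem.Str.lower (PySem.Str.join "" [table, "_id"])
  let st := cols.foldl (pvStep t_id) (none, none, none)
  match st.1 with
  | some n => some n
  | none =>
    match st.2.1 with
    | some n => some n
    | none => st.2.2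

-- ===== PRECONDITION & SPEC =====
-- Pre_ excludes exactly the inputs where some column dict lacks the "name" key: there the
-- Python A raises KeyError (and the Python B raises the same KeyError), returning no value.
def Pre_infer_key (table : String) (cols : List (List (String × String))) : Prop :=
  ∀ c ∈ cols, (PySem.Dict.mk c).contains "name" = true
instance (table : String) (cols : List (List (String × String))) : Decidable (Pre_infer_key table cols) := by unfold Pre_infer_key; infer_instance

def pvWitness_infer_key : String × (List (List (String × String))) :=
  ("user", [[("name", "User_ID")], [("name", "id")]])

def Spec_infer_key (table : String) (cols : List (List (String × String))) (out : Option String) : Prop := out = infer_key_alt table cols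
instance (table : String) (cols : List (List (String × String))) (out : Option String) : Decidable (Spec_infer_key table cols out) := by unfold Spec_infer_key; infer_instance

-- ===== CLAIM (what is proved, stated in full; the proofs are below) =====
def Claim_equal_infer_key : Prop := ∀ (table : String) (cols : List (List (String × String))), Dom_infer_key table cols → Pre_infer_key table cols → Spec_infer_key table cols (infer_key table cols)

-- ===== LEMMAS AND PROOFS =====

-- the membership test A makes: the f-image of names contains t iff a first n with f n = t exists
theorem pv_contains_find (names : List String) (f : String → String) (t : String) :
    (names.map f).contains t = (names.find? (fun n => f n == t)).isSome := by
  induction names with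
  | nil => rfl
  | cons n ns ih =>
    by_cases h : f n = t
    · have h1 : (t == f n) = true := by simpa using h.symm
      rw [List.map_cons, List.contains_cons, h1,
        List.find?_cons_of_pos (by simpa using h)]
      rfl
    · have h1 : (t == f n) = false := by simpa using fun hh => h hh.symm
      rw [List.map_cons, List.contains_cons, h1,
        List.find?_cons_of_neg (by simpa using h), Bool.false_or, ih]

-- A's 'names[lower.index(t)]' is the first name whose f-image is t
theorem pv_index_get (names : List String) (f : String → String) (t : String) :
    (match PySem.List.index? (names.map f) t with
     | some i => PySem.List.pyGet? names (i : Int)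
     | none => (none : Option String)) = names.find? (fun n => f n == t) := by
  induction names with
  | nil => rfl
  | cons n ns ih =>
    rw [List.map_cons]
    by_cases h : f n = t
    · rw [← h, PySem.List.index?_cons_self,
        List.find?_cons_of_pos (by simp)]
      simp
    · rw [PySem.List.index?_cons_of_ne _ h,
        List.find?_cons_of_neg (by simpa using h), ← ih]
      cases hidx : PySem.List.index? (ns.map f) t with
      | none => simp
      | some i =>
        simp only [Option.map_some]
        rw [PySem.List.pyGet?_natCast, PySem.List.pyGet?_natCast]
        simp

-- one accumulator of B's loop: keep an earlier match, else take the first match in the rest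
theorem pv_comp (q : List (String × String) → Bool) (c : List (String × String))
    (cs : List (List (String × String))) (a : Option String) :
    (if a.isNone && q c then some (pvName c) else a).or ((cs.find? q).map pvName)
      = a.or (((c :: cs).find? q).map pvName) := by
  cases a with
  | some x => simp
  | none =>
    cases hq : q c
    · rw [List.find?_cons_of_neg (by simpa using hq)]; simp
    · rw [List.find?_cons_of_pos (by simpa using hq)]; simp

-- B's fold from an arbitrary state: each component keeps its value or takes the first match
theorem pv_foldB (t_id : String) (cols : List (List (String × String)))
    (tm sm im : Option String) :
    cols.foldl (pvStep t_id) (tm, sm, im) =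
      (tm.or ((cols.find? (fun c => PySem.Str.lower (pvName c) == t_id)).map pvName),
       sm.or ((cols.find? (fun c => PySem.Str.endswith (PySem.Str.lower (pvName c)) "_id")).map pvName),
       im.or ((cols.find? (fun c => PySem.Str.lower (pvName c) == "id")).map pvName)) := by
  induction cols generalizing tm sm im with
  | nil => simp
  | cons c cs ih =>
    rw [List.foldl_cons, show pvStep t_id (tm, sm, im) c =
      ((if tm.isNone && (PySem.Str.lower (pvName c) == t_id) then some (pvName c) else tm),
       (if sm.isNone && PySem.Str.endswith (PySem.Str.lower (pvName c)) "_id" then some (pvName c) else sm),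
       (if im.isNone && (PySem.Str.lower (pvName c) == "id") then some (pvName c) else im)) from rfl,
      ih]
    refine Prod.ext ?_ (Prod.ext ?_ ?_)
    · exact pv_comp (fun c => PySem.Str.lower (pvName c) == t_id) c cs tm
    · exact pv_comp (fun c => PySem.Str.endswith (PySem.Str.lower (pvName c)) "_id") c cs sm
    · exact pv_comp (fun c => PySem.Str.lower (pvName c) == "id") c cs im

-- ===== VERDICT (by name: the statement is the Claim_ definition above) =====
theorem infer_key_spec : Claim_equal_infer_key := by
  intro table cols _ _
  unfold Spec_infer_key infer_key infer_key_alt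
  dsimp only
  rw [pv_foldB, pv_contains_find, pv_contains_find, pv_index_get, pv_index_get]
  simp only [List.find?_map, Function.comp_def]
  cases hT : cols.find? (fun c =>
      PySem.Str.lower (pvName c) == PySem.Str.lower (PySem.Str.join "" [table, "_id"])) <;>
    cases hS : cols.find? (fun c => PySem.Str.endswith (PySem.Str.lower (pvName c)) "_id") <;>
    cases hI : cols.find? (fun c => PySem.Str.lower (pvName c) == "id") <;>
    simp
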